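-- pv_equiv track=rewrite | github.com/jornadasaosucesso/site-numerologia | calcular.py | calcular_numero
-- ===== SOURCE A (Python) =====
-- def calcular_numero(letras):
--     tabela = {
--         'A':1, 'J':1, 'S':1,
--         'B':2, 'K':2, 'T':2,
--         'C':3, 'L':3, 'U':3,
--         'D':4, 'M':4, 'V':4,
--         'E':5, 'N':5, 'W':5,
--         'F':6, 'O':6, 'X':6,
--         'G':7, 'P':7, 'Y':7,
--         'H':8, 'Q':8, 'Z':8,
--         'I':9, 'R':9
--     }
--     numeros = [tabela[letra] for letra in letras if letra in tabela]
--     soma = sum(numeros)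
--     while soma > 9:
--         soma = sum(int(d) for d in str(soma))
--     return soma
-- ===== SOURCE B (Python) =====
-- def calcular_numero(letras):
--     soma = sum((ord(c) - 65) % 9 + 1 for c in letras if 'A' <= c <= 'Z')
--     return 0 if soma == 0 else (soma - 1) % 9 + 1
-- ===== Notes on version B (the rewrite author's own statement) =====
-- stated objective: idiomatic
-- what changed: Replaces the dict table by the closed-form letter value (ord(c)-65)%9+1 and, mainly, replaces the iterative while-loop digit-sum reduction by the constant-time digital-root formula 1+(soma-1)%9 with a zero guard.
import Mathlib
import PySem

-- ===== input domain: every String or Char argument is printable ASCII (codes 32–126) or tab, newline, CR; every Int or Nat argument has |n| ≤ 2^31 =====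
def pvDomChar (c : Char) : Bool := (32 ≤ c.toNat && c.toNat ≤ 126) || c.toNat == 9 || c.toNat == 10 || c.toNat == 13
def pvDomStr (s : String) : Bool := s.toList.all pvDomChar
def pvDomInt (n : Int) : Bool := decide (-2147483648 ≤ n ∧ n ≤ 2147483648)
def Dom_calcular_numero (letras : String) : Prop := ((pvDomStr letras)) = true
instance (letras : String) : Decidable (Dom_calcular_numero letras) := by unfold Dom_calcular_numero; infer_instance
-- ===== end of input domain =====

-- B replaces A's iterative while-loop digit-sum reduction by the closed-form digital root
-- (and the letter table by the arithmetic (ord(c)-65)%9+1): simpler/idiomatic, same letter-sum semantics.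


-- ===== PORT A =====
-- A's literal table
def pvTabela : PySem.Dict Char Int := PySem.Dict.ofList
  [('A',1), ('J',1), ('S',1),
   ('B',2), ('K',2), ('T',2),
   ('C',3), ('L',3), ('U',3),
   ('D',4), ('M',4), ('V',4),
   ('E',5), ('N',5), ('W',5),
   ('F',6), ('O',6), ('X',6),
   ('G',7), ('P',7), ('Y',7),
   ('H',8), ('Q',8), ('Z',8),
   ('I',9), ('R',9)]

-- sum(int(d) for d in str(soma)); in A this is only reached with soma > 9, where str(soma)
-- is all decimal digits, so int(d) never raises and the `getD 0` default is unreachable.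
def pvDigitSum (soma : Int) : Int :=
  ((PySem.Int.toStr soma).toList.map (fun d => (PySem.Int.ofStr? (String.ofList [d])).getD 0)).sum

-- lemmas needed only for the termination of the while loop (cited by the port in decreasing_by)
lemma pv_toDigitsCore_eq (f : ℕ) : ∀ (n : ℕ) (ds : List Char), 0 < n → n ≤ f →
    Nat.toDigitsCore 10 f n ds = ((Nat.digits 10 n).map Nat.digitChar).reverse ++ ds := by
  induction f with
  | zero => intro n ds hpos hle; omega
  | succ f ih =>
    intro n ds hpos hle
    rw [Nat.toDigitsCore]
    rw [Nat.digits_def' (by norm_num : 1 < 10) hpos]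
    by_cases h : n / 10 = 0
    · simp [h]
    · simp only [h]
      rw [ih (n / 10) _ (Nat.pos_of_ne_zero h) (by omega)]
      simp

lemma pv_digitChar_parse (d : ℕ) (h : d < 10) :
    PySem.Int.ofStr? (String.ofList [Nat.digitChar d]) = some (d : Int) := by
  interval_cases d <;> decide

lemma pvDigitSum_eq (s : Int) (h : 0 < s) :
    pvDigitSum s = ((Nat.digits 10 s.toNat).sum : Int) := by
  unfold pvDigitSum
  rw [PySem.Int.toList_toStr]
  unfold PySem.Int.toChars
  rw [if_neg (by omega)]
  rw [Nat.toDigits, pv_toDigitsCore_eq _ _ _ (by omega) (by omega)]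
  rw [List.append_nil, ← List.map_reverse, List.map_map, List.map_reverse, List.sum_reverse]
  rw [Nat.cast_list_sum]
  congr 1
  apply List.map_congr_left
  intro d hd
  have hlt : d < 10 := Nat.digits_lt_base (by norm_num) hd
  simp [Function.comp, pv_digitChar_parse d hlt]

lemma pv_digits_sum_le (n : ℕ) : (Nat.digits 10 n).sum ≤ n := by
  induction n using Nat.strong_induction_on with
  | _ n ih =>
    rcases Nat.eq_zero_or_pos n with h | h
    · subst h; simp
    · rw [Nat.digits_def' (by norm_num : 1 < 10) h]
      have := ih (n / 10) (by omega)
      simp only [List.sum_cons]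
      omega

lemma pv_digits_sum_lt (n : ℕ) (h : 10 ≤ n) : (Nat.digits 10 n).sum < n := by
  rw [Nat.digits_def' (by norm_num : 1 < 10) (by omega)]
  have := pv_digits_sum_le (n / 10)
  simp only [List.sum_cons]
  omega

lemma pvDigitSum_toNat_lt (s : Int) (h : 9 < s) : (pvDigitSum s).toNat < s.toNat := by
  rw [pvDigitSum_eq s (by omega)]
  have := pv_digits_sum_lt s.toNat (by omega)
  omega

-- A's `while soma > 9:` loop
def pvCalcLoop (soma : Int) : Int :=
  if 9 < soma then pvCalcLoop (pvDigitSum soma) else soma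
termination_by soma.toNat
decreasing_by exact pvDigitSum_toNat_lt soma (by omega)

def calcular_numero (letras : String) : Int :=
  let numeros := letras.toList.filterMap (fun letra => pvTabela.get? letra)
  pvCalcLoop numeros.sum

-- ===== PORT B =====
def calcular_numero_alt (letras : String) : Int :=
  let soma := (letras.toList.filterMap (fun c =>
    if 'A' ≤ c ∧ c ≤ 'Z' then some (PySem.Int.mod ((c.toNat : Int) - 65) 9 + 1) else none)).sum
  if soma = 0 then 0 else PySem.Int.mod (soma - 1) 9 + 1

-- ===== PRECONDITION & SPEC =====
def Spec_calcular_numero (letras : String) (out : Int) : Prop := out = calcular_numero_alt letras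
instance (letras : String) (out : Int) : Decidable (Spec_calcular_numero letras out) := by unfold Spec_calcular_numero; infer_instance

-- ===== CLAIM (what is proved, stated in full; the proofs are below) =====
def Claim_equal_calcular_numero : Prop := ∀ (letras : String), Dom_calcular_numero letras → Spec_calcular_numero letras (calcular_numero letras)

-- ===== LEMMAS AND PROOFS =====

lemma pv_digits_sum_pos (n : ℕ) (h : 0 < n) : 0 < (Nat.digits 10 n).sum := by
  induction n using Nat.strong_induction_on with
  | _ n ih =>
    rw [Nat.digits_def' (by norm_num : 1 < 10) h]
    simp only [List.sum_cons]
    rcases Nat.eq_zero_or_pos (n / 10) with h10 | h10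
    · omega
    · have := ih (n / 10) (by omega) h10
      omega

lemma pv_fmod9_eq (a : Int) : a.fmod 9 = a % 9 := by
  rw [Int.fmod_eq_emod]; simp

lemma pv_fmod9_bounds (a : Int) : 0 ≤ a.fmod 9 ∧ a.fmod 9 < 9 := by
  rw [pv_fmod9_eq]; omega

-- the value of A's table at an arbitrary character, in B's arithmetic form
lemma pvTabela_get?_ofNat (n : ℕ) (h1 : 65 ≤ n) (h2 : n ≤ 90) :
    pvTabela.get? (Char.ofNat n) = some (PySem.Int.mod ((n : Int) - 65) 9 + 1) := by
  interval_cases n <;> decide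

set_option maxHeartbeats 1000000 in
lemma pvTabela_get?_none (c : Char) (hn : ¬(65 ≤ c.toNat ∧ c.toNat ≤ 90)) :
    pvTabela.get? c = none := by
  have htab : pvTabela = PySem.Dict.mk
    [('A',1), ('J',1), ('S',1), ('B',2), ('K',2), ('T',2), ('C',3), ('L',3), ('U',3),
     ('D',4), ('M',4), ('V',4), ('E',5), ('N',5), ('W',5), ('F',6), ('O',6), ('X',6),
     ('G',7), ('P',7), ('Y',7), ('H',8), ('Q',8), ('Z',8), ('I',9), ('R',9)] := by
    decide
  have key : ∀ d : Char, 65 ≤ d.toNat → d.toNat ≤ 90 → ¬((d == c) = true) := by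
    intro d h1 h2 hbeq
    have hdc : d = c := eq_of_beq hbeq
    subst hdc
    exact hn ⟨h1, h2⟩
  rw [htab,
      PySem.Dict.get?_mk_cons, if_neg (key 'A' (by decide) (by decide)),
      PySem.Dict.get?_mk_cons, if_neg (key 'J' (by decide) (by decide)),
      PySem.Dict.get?_mk_cons, if_neg (key 'S' (by decide) (by decide)),
      PySem.Dict.get?_mk_cons, if_neg (key 'B' (by decide) (by decide)),
      PySem.Dict.get?_mk_cons, if_neg (key 'K' (by decide) (by decide)),
      PySem.Dict.get?_mk_cons, if_neg (key 'T' (by decide) (by decide)),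
      PySem.Dict.get?_mk_cons, if_neg (key 'C' (by decide) (by decide)),
      PySem.Dict.get?_mk_cons, if_neg (key 'L' (by decide) (by decide)),
      PySem.Dict.get?_mk_cons, if_neg (key 'U' (by decide) (by decide)),
      PySem.Dict.get?_mk_cons, if_neg (key 'D' (by decide) (by decide)),
      PySem.Dict.get?_mk_cons, if_neg (key 'M' (by decide) (by decide)),
      PySem.Dict.get?_mk_cons, if_neg (key 'V' (by decide) (by decide)),
      PySem.Dict.get?_mk_cons, if_neg (key 'E' (by decide) (by decide)),
      PySem.Dict.get?_mk_cons, if_neg (key 'N' (by decide) (by decide)),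
      PySem.Dict.get?_mk_cons, if_neg (key 'W' (by decide) (by decide)),
      PySem.Dict.get?_mk_cons, if_neg (key 'F' (by decide) (by decide)),
      PySem.Dict.get?_mk_cons, if_neg (key 'O' (by decide) (by decide)),
      PySem.Dict.get?_mk_cons, if_neg (key 'X' (by decide) (by decide)),
      PySem.Dict.get?_mk_cons, if_neg (key 'G' (by decide) (by decide)),
      PySem.Dict.get?_mk_cons, if_neg (key 'P' (by decide) (by decide)),
      PySem.Dict.get?_mk_cons, if_neg (key 'Y' (by decide) (by decide)),
      PySem.Dict.get?_mk_cons, if_neg (key 'H' (by decide) (by decide)),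
      PySem.Dict.get?_mk_cons, if_neg (key 'Q' (by decide) (by decide)),
      PySem.Dict.get?_mk_cons, if_neg (key 'Z' (by decide) (by decide)),
      PySem.Dict.get?_mk_cons, if_neg (key 'I' (by decide) (by decide)),
      PySem.Dict.get?_mk_cons, if_neg (key 'R' (by decide) (by decide))]
  rfl

lemma pvTabela_get?_eq (c : Char) :
    pvTabela.get? c =
      if 'A' ≤ c ∧ c ≤ 'Z' then some (PySem.Int.mod ((c.toNat : Int) - 65) 9 + 1) else none := by
  have hcond : ('A' ≤ c ∧ c ≤ 'Z') ↔ (65 ≤ c.toNat ∧ c.toNat ≤ 90) := by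
    rw [Char.le_def, Char.le_def, UInt32.le_iff_toNat_le, UInt32.le_iff_toNat_le]
    exact Iff.rfl
  by_cases h : 65 ≤ c.toNat ∧ c.toNat ≤ 90
  · rw [if_pos (hcond.mpr h), ← Char.ofNat_toNat c, pvTabela_get?_ofNat c.toNat h.1 h.2]
    rw [Char.ofNat_toNat]
  · rw [if_neg (fun hc => h (hcond.mp hc)), pvTabela_get?_none c h]

lemma pvSoma_nonneg (letras : String) :
    0 ≤ (letras.toList.filterMap (fun c =>
      if 'A' ≤ c ∧ c ≤ 'Z' then some (PySem.Int.mod ((c.toNat : Int) - 65) 9 + 1) else none)).sum := by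
  apply List.sum_nonneg
  intro x hx
  obtain ⟨c, _, hc⟩ := List.mem_filterMap.mp hx
  split_ifs at hc with h
  · obtain rfl : PySem.Int.mod ((c.toNat : Int) - 65) 9 + 1 = x := Option.some_inj.mp hc
    have := pv_fmod9_bounds ((c.toNat : Int) - 65)
    unfold PySem.Int.mod
    omega

lemma pvCalcLoop_eq (s : Int) (h : 0 ≤ s) :
    pvCalcLoop s = if s = 0 then 0 else PySem.Int.mod (s - 1) 9 + 1 := by
  induction s using pvCalcLoop.induct with
  | case1 s h9 ih =>
    rw [pvCalcLoop, if_pos h9]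
    have hds : pvDigitSum s = ((Nat.digits 10 s.toNat).sum : Int) := pvDigitSum_eq s (by omega)
    have hpos : 0 < (Nat.digits 10 s.toNat).sum := pv_digits_sum_pos s.toNat (by omega)
    rw [ih (by omega)]
    rw [if_neg (by omega), if_neg (by omega)]
    have hmod : s.toNat % 9 = (Nat.digits 10 s.toNat).sum % 9 :=
      Nat.modEq_digits_sum 9 10 (by norm_num) s.toNat
    have hmodZ : pvDigitSum s % 9 = s % 9 := by
      rw [hds]
      omega
    unfold PySem.Int.mod
    rw [pv_fmod9_eq, pv_fmod9_eq]
    omega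
  | case2 s h9 =>
    rw [pvCalcLoop, if_neg h9]
    split_ifs with h0
    · exact h0
    · unfold PySem.Int.mod
      rw [pv_fmod9_eq]
      omega

-- ===== VERDICT (by name: the statement is the Claim_ definition above) =====
theorem calcular_numero_spec : Claim_equal_calcular_numero := by
  intro letras _
  unfold Spec_calcular_numero calcular_numero calcular_numero_alt
  rw [List.filterMap_congr (fun c _ => pvTabela_get?_eq c)]
  exact pvCalcLoop_eq _ (pvSoma_nonneg letras)
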